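-- pv_equiv track=rewrite | github.com/xuanvietchu/Predict_sentence | infer_bartpho.py | filter_answer
-- ===== SOURCE A (Python) =====
-- def levenshteinDistance(s1, s2):
--     s1 = s1.split()
--     s2 = s2.split()
--     if len(s1) > len(s2):
--         s1, s2 = s2, s1
--
--     distances = range(len(s1) + 1)
--     for i2, c2 in enumerate(s2):
--         distances_ = [i2+1]
--         for i1, c1 in enumerate(s1):
--             if c1 == c2:
--                 distances_.append(distances[i1])
--             else:
--                 distances_.append(1 + min((distances[i1], distances[i1 + 1], distances_[-1])))
--         distances = distances_
--     final_distance = distances[-1]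
--     score = final_distance / max(len(s1), len(s2))
--     return {
--         "raw_distance": final_distance,
--         "score": score
--     }
--
-- def filter_answer(raw_sentence, paraphrase_sentences):
--     output = []
--     for sen in paraphrase_sentences:
--         distance_score = levenshteinDistance(raw_sentence, sen)
--         raw_distance = distance_score["raw_distance"]
--         score = distance_score["score"]
--         if raw_distance >= 0.02*len(raw_sentence):
--             output.append((raw_distance, sen))
--     output.sort(reverse=True)
--
--     return output
-- ===== SOURCE B (Python) =====
-- def word_distance(t1, t2):
--     # Top-down memoized recursion over prefix-length pairs (i, j):
--     # go(i, j) = word-level edit distance between t1[:i] and t2[:j].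
--     memo = {}
--     def go(i, j):
--         if i == 0:
--             return j
--         if j == 0:
--             return i
--         key = (i, j)
--         if key in memo:
--             return memo[key]
--         if t1[i - 1] == t2[j - 1]:
--             d = go(i - 1, j - 1)
--         else:
--             d = 1 + min(go(i - 1, j - 1), go(i - 1, j), go(i, j - 1))
--         memo[key] = d
--         return d
--     return go(len(t1), len(t2))
--
-- def filter_answer(raw_sentence, paraphrase_sentences):
--     tokens = raw_sentence.split()
--     scored = [(word_distance(tokens, sen.split()), sen) for sen in paraphrase_sentences]
--     kept = [p for p in scored if p[0] >= 0.02 * len(raw_sentence)]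
--     return sorted(kept, reverse=True)
-- ===== Notes on version B (the rewrite author's own statement) =====
-- stated objective: alternative
-- what changed: B replaces A's bottom-up iterative Levenshtein (enumerate loops over rolling rows, with a shorter-list swap) by a top-down memoized recursion go(i,j) on prefix-length pairs cached in a dict, and rebuilds the driver as staged passes (score all, filter, sorted) that split raw_sentence once instead of once per paraphrase sentence (the hoisted split removes A's O(k*R) re-splitting term).
import Mathlib
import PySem

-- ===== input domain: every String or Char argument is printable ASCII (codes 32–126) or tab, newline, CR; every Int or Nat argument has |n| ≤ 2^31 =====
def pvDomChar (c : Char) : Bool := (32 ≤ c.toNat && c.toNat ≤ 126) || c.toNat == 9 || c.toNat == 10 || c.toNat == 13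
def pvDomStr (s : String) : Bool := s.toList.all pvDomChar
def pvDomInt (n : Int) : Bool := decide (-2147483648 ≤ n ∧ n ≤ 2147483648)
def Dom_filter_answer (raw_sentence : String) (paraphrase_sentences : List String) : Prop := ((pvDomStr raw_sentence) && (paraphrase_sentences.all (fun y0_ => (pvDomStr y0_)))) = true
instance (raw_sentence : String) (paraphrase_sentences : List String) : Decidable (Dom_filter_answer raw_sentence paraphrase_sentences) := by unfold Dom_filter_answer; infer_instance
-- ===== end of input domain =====

-- B replaces A's bottom-up two-row iteration (with shorter-list swap) by a top-down memoized
-- recursion on prefix-index pairs cached in a dict, and restructures the driver into staged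
-- passes (score all, filter, sort) splitting raw_sentence once (objective: alternative).

-- Exact integer model of Python's float comparison `d >= 0.02*n` (d an int ≥ 0, n a string length):
-- fl(fl(0.02)*n) lies strictly between (n-1)/50 and (n+1)/50 and equals n/50 exactly when 50 ∣ n
-- (the product's excess over n/50 is under a tenth of an ulp), so for n < 2^50 the comparison is
-- exactly `50*d >= n`. Both Python sources contain this same comparison, so both ports use this model.
def pyGe002 (d : Int) (n : Int) : Bool := n ≤ 50 * d

-- ===== PORT A =====
-- transliteration of A's levenshteinDistance; the unused float `score` is not computed — the inputs
-- where its division raises ZeroDivisionError (both splits empty) are excluded by Pre_filter_answer.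
def levenshteinDistanceA (s1 : String) (s2 : String) : Int :=
  let l1 := PySem.Str.split₀ s1
  let l2 := PySem.Str.split₀ s2
  let p := if l1.length > l2.length then (l2, l1) else (l1, l2)
  let a := p.1
  let b := p.2
  let distances0 : List Int := PySem.List.pyRange 0 ((a.length : Int) + 1) 1
  let distances :=
    (PySem.List.enumerate b 0).foldl (fun distances ic =>
      (PySem.List.enumerate a 0).foldl (fun ds jc =>
        if jc.2 == ic.2 then
          ds ++ [PySem.List.pyGetD distances jc.1 0]
        else
          ds ++ [1 + min (min (PySem.List.pyGetD distances jc.1 0)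
                              (PySem.List.pyGetD distances (jc.1 + 1) 0))
                         (PySem.List.pyGetD ds (-1) 0)])
        [ic.1 + 1]) distances0
  PySem.List.pyGetD distances (-1) 0
  -- every index into `distances`/`ds` is provably in range, so `pyGetD _ _ 0` is exact

def filter_answer (raw_sentence : String) (paraphrase_sentences : List String) : List (Int × String) :=
  let output : List (Int × String) :=
    paraphrase_sentences.foldl (fun output sen =>
      let raw_distance := levenshteinDistanceA raw_sentence sen
      if pyGe002 raw_distance (PySem.Str.len raw_sentence) then output ++ [(raw_distance, sen)]
      else output) []
  PySem.List.sorted2 output (fun p => p.1) (fun p => p.2) true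

-- ===== PORT B =====
-- transliteration of Source B's word_distance: top-down memoized recursion go(i, j) on prefix-length
-- pairs; the memo dict is threaded through the recursion (Python mutates the closure's dict).
-- Every t1[i-1]/t2[j-1] index is in range (1 ≤ i ≤ len t1), so `pyGetD _ _ ""` is exact.
def goB (t1 t2 : List String) : Nat → Nat → PySem.Dict (Int × Int) Int → Int × PySem.Dict (Int × Int) Int
  | 0, j, memo => ((j : Int), memo)
  | i+1, 0, memo => ((i : Int) + 1, memo)
  | i+1, j+1, memo =>
      let key : Int × Int := (((i : Int) + 1), ((j : Int) + 1))
      match memo.get? key with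
      | some v => (v, memo)
      | none =>
          if PySem.List.pyGetD t1 (((i : Int) + 1) - 1) "" == PySem.List.pyGetD t2 (((j : Int) + 1) - 1) "" then
            let r := goB t1 t2 i j memo
            (r.1, r.2.insert key r.1)
          else
            let r1 := goB t1 t2 i j memo
            let r2 := goB t1 t2 i (j+1) r1.2
            let r3 := goB t1 t2 (i+1) j r2.2
            let d := 1 + min (min r1.1 r2.1) r3.1
            (d, r3.2.insert key d)
  termination_by i j _ => (i, j)

def wordDistance (t1 : List String) (t2 : List String) : Int :=
  (goB t1 t2 t1.length t2.length PySem.Dict.empty).1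

def filter_answer_alt (raw_sentence : String) (paraphrase_sentences : List String) : List (Int × String) :=
  let tokens := PySem.Str.split₀ raw_sentence
  let scored := paraphrase_sentences.map (fun sen => (wordDistance tokens (PySem.Str.split₀ sen), sen))
  let kept := scored.filter (fun p => pyGe002 p.1 (PySem.Str.len raw_sentence))
  PySem.List.sorted2 kept (fun p => p.1) (fun p => p.2) true

-- ===== PRECONDITION & SPEC =====
-- Pre_ excludes exactly the inputs where A raises ZeroDivisionError in
-- `score = final_distance / max(len(s1), len(s2))`: raw_sentence splits to no words and
-- some paraphrase sentence also splits to no words.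
def Pre_filter_answer (raw_sentence : String) (paraphrase_sentences : List String) : Prop :=
  PySem.Str.split₀ raw_sentence ≠ [] ∨ ∀ sen ∈ paraphrase_sentences, PySem.Str.split₀ sen ≠ []

instance (raw_sentence : String) (paraphrase_sentences : List String) : Decidable (Pre_filter_answer raw_sentence paraphrase_sentences) := by unfold Pre_filter_answer; infer_instance

def pvWitness_filter_answer : String × List String := ("the cat sat", ["the cat sat here", "", "a dog"])

def Spec_filter_answer (raw_sentence : String) (paraphrase_sentences : List String) (out : List (Int × String)) : Prop := out = filter_answer_alt raw_sentence paraphrase_sentences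
instance (raw_sentence : String) (paraphrase_sentences : List String) (out : List (Int × String)) : Decidable (Spec_filter_answer raw_sentence paraphrase_sentences out) := by unfold Spec_filter_answer; infer_instance

-- ===== CLAIM (what is proved, stated in full; the proofs are below) =====
def Claim_equal_filter_answer : Prop := ∀ (raw_sentence : String) (paraphrase_sentences : List String), Dom_filter_answer raw_sentence paraphrase_sentences → Pre_filter_answer raw_sentence paraphrase_sentences → Spec_filter_answer raw_sentence paraphrase_sentences (filter_answer raw_sentence paraphrase_sentences)

-- ===== LEMMAS AND PROOFS =====

-- The mathematical prefix recurrence both programs compute: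
-- T t1 t2 i j = word-level edit distance between the first i tokens of t1 and the first j of t2.
-- Its `else` branch is nested exactly as in B's go; A's nesting differs by min-AC.
def T (t1 t2 : List String) : Nat → Nat → Int
  | 0, j => (j : Int)
  | (i+1), 0 => (i : Int) + 1
  | (i+1), (j+1) =>
      if t1.getD i "" == t2.getD j "" then T t1 t2 i j
      else 1 + min (min (T t1 t2 i j) (T t1 t2 i (j+1))) (T t1 t2 (i+1) j)
termination_by i j => (i, j)

lemma T_zero_right (t1 t2 : List String) (i : Nat) : T t1 t2 i 0 = (i : Int) := by
  cases i <;> simp [T]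

lemma T_symm (t1 t2 : List String) (i j : Nat) : T t1 t2 i j = T t2 t1 j i := by
  have key : ∀ n i j, i + j ≤ n → T t1 t2 i j = T t2 t1 j i := by
    intro n
    induction n with
    | zero => intro i j h
              have hi : i = 0 := by omega
              have hj : j = 0 := by omega
              subst hi; subst hj; simp [T]
    | succ n ih =>
        intro i j h
        match i, j with
        | 0, j => simp [T, T_zero_right]
        | (i+1), 0 => simp [T, T_zero_right]
        | (i+1), (j+1) =>
            by_cases hc : t1.getD i "" = t2.getD j ""
            · have hc1 : (t1.getD i "" == t2.getD j "") = true := by rw [beq_iff_eq]; exact hc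
              have hc1' : (t2.getD j "" == t1.getD i "") = true := by rw [beq_iff_eq]; exact hc.symm
              simp only [T, hc1, hc1', if_true]
              exact ih i j (by omega)
            · have hc2 : (t1.getD i "" == t2.getD j "") = false := by rw [beq_eq_false_iff_ne]; exact hc
              have hc3 : (t2.getD j "" == t1.getD i "") = false := by rw [beq_eq_false_iff_ne]; exact (Ne.symm hc)
              simp only [T, hc2, hc3]
              rw [ih i j (by omega), ih i (j+1) (by omega), ih (i+1) j (by omega)]
              rw [min_assoc, min_assoc, min_comm (T t2 t1 (j+1) i) (T t2 t1 j (i+1))]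
  exact key (i + j) i j le_rfl

-- ----- B side: the memoized recursion computes T -----

def GoodMemo (t1 t2 : List String) (memo : PySem.Dict (Int × Int) Int) : Prop :=
  ∀ (p q : Nat) (v : Int), memo.get? ((p : Int), (q : Int)) = some v → v = T t1 t2 p q

lemma GoodMemo_insert (t1 t2 : List String) (memo : PySem.Dict (Int × Int) Int)
    (h : GoodMemo t1 t2 memo) (i j : Nat) (v : Int) (hv : v = T t1 t2 i j) :
    GoodMemo t1 t2 (memo.insert ((i : Int), (j : Int)) v) := by
  intro p q w hw
  rw [PySem.Dict.get?_insert] at hw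
  split_ifs at hw with hk
  · rw [Prod.mk.injEq] at hk
    have hp : p = i := by exact_mod_cast hk.1
    have hq : q = j := by exact_mod_cast hk.2
    cases hw
    rw [hp, hq, hv]
  · exact h p q w hw

lemma goB_correct (t1 t2 : List String) :
    ∀ (i j : Nat) (memo : PySem.Dict (Int × Int) Int), GoodMemo t1 t2 memo →
      (goB t1 t2 i j memo).1 = T t1 t2 i j ∧ GoodMemo t1 t2 (goB t1 t2 i j memo).2 := by
  intro i
  induction i with
  | zero => intro j memo h; simp [goB, T]; exact h
  | succ i ihi =>
      intro j
      induction j with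
      | zero => intro memo h; simp [goB, T_zero_right]; exact h
      | succ j ihj =>
          intro memo h
          rw [goB]
          rcases hmem : memo.get? (((i : Int) + 1), ((j : Int) + 1)) with _ | v
          · simp only [hmem]
            have hkey1 : (i : Int) + 1 = ((i + 1 : Nat) : Int) := by omega
            have hkey2 : (j : Int) + 1 = ((j + 1 : Nat) : Int) := by omega
            have e1 : (i : Int) + 1 - 1 = ((i : Nat) : Int) := by omega
            have e2 : (j : Int) + 1 - 1 = ((j : Nat) : Int) := by omega
            rw [e1, e2, PySem.List.pyGetD_natCast, PySem.List.pyGetD_natCast]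
            by_cases hc : (t1.getD i "" == t2.getD j "") = true
            · rw [if_pos hc]
              obtain ⟨hv, hg⟩ := ihi j memo h
              have hT : T t1 t2 (i + 1) (j + 1) = T t1 t2 i j := by
                simp only [T, hc, if_true]
              refine ⟨by simpa [hT] using hv, ?_⟩
              simp only
              rw [hkey1, hkey2]
              exact GoodMemo_insert t1 t2 _ hg (i + 1) (j + 1) _ (by rw [hv, hT])
            · rw [if_neg hc]
              obtain ⟨hv1, hg1⟩ := ihi j memo h
              obtain ⟨hv2, hg2⟩ := ihi (j + 1) _ hg1
              obtain ⟨hv3, hg3⟩ := ihj _ hg2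
              have hT : T t1 t2 (i + 1) (j + 1)
                  = 1 + min (min (T t1 t2 i j) (T t1 t2 i (j+1))) (T t1 t2 (i+1) j) := by
                rw [T]
                rw [if_neg hc]
              refine ⟨by rw [hv1, hv2, hv3, hT], ?_⟩
              simp only
              rw [hkey1, hkey2]
              exact GoodMemo_insert t1 t2 _ hg3 (i + 1) (j + 1) _ (by rw [hv1, hv2, hv3, hT])
          · simp only [hmem]
            have hkey1 : (i : Int) + 1 = ((i + 1 : Nat) : Int) := by omega
            have hkey2 : (j : Int) + 1 = ((j + 1 : Nat) : Int) := by omega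
            rw [hkey1, hkey2] at hmem
            exact ⟨h (i + 1) (j + 1) v hmem, h⟩

lemma wordDistance_eq_T (t1 t2 : List String) :
    wordDistance t1 t2 = T t1 t2 t1.length t2.length := by
  have hempty : GoodMemo t1 t2 PySem.Dict.empty := by
    intro p q v hv
    rw [PySem.Dict.get?_empty] at hv
    cases hv
  exact (goB_correct t1 t2 t1.length t2.length PySem.Dict.empty hempty).1

-- ----- A side: the swapped two-row loop computes T -----

lemma row_inner (a b : List String) (j : Nat) (c2 : String) (hc2 : c2 = b.getD j "")
    (dist : List Int) (hdist : dist = (List.range (a.length + 1)).map (fun i => T a b i j)) :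
    ∀ (suf : List String) (k : Nat), a.drop k = suf → k ≤ a.length →
    (PySem.List.enumerate suf (k : Int)).foldl
      (fun ds jc =>
        if jc.2 == c2 then
          ds ++ [PySem.List.pyGetD dist jc.1 0]
        else
          ds ++ [1 + min (min (PySem.List.pyGetD dist jc.1 0)
                              (PySem.List.pyGetD dist (jc.1 + 1) 0))
                         (PySem.List.pyGetD ds (-1) 0)])
      ((List.range (k + 1)).map (fun i => T a b i (j + 1)))
    = (List.range (a.length + 1)).map (fun i => T a b i (j + 1)) := by
  intro suf
  induction suf with
  | nil =>
      intro k hdrop hk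
      have : a.length = k := by
        have := congrArg List.length hdrop
        simp [List.length_drop] at this
        omega
      simp [PySem.List.enumerate, this]
  | cons x suf' ih =>
      intro k hdrop hk
      have hklt : k < a.length := by
        have := congrArg List.length hdrop
        simp [List.length_drop] at this
        omega
      have hx : a[k]? = some x := by
        have h0 : (a.drop k)[0]? = a[k]? := by simp [List.getElem?_drop]
        rw [hdrop] at h0
        simpa using h0.symm
      have hgetD : a.getD k "" = x := by simp [List.getD, hx]
      have hdrop' : a.drop (k + 1) = suf' := by
        have : List.drop 1 (a.drop k) = suf' := by rw [hdrop]; simp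
        rwa [List.drop_drop] at this
      rw [PySem.List.enumerate_cons, List.foldl_cons]
      have hstep :
          (if x == c2 then
            ((List.range (k + 1)).map (fun i => T a b i (j + 1))) ++ [PySem.List.pyGetD dist (k : Int) 0]
          else
            ((List.range (k + 1)).map (fun i => T a b i (j + 1))) ++
              [1 + min (min (PySem.List.pyGetD dist (k : Int) 0)
                            (PySem.List.pyGetD dist ((k : Int) + 1) 0))
                       (PySem.List.pyGetD ((List.range (k + 1)).map (fun i => T a b i (j + 1))) (-1) 0)])
          = (List.range (k + 1 + 1)).map (fun i => T a b i (j + 1)) := by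
        have hd1 : PySem.List.pyGetD dist (k : Int) 0 = T a b k j := by
          rw [hdist, PySem.List.pyGetD_natCast, PySem.List.getD_map_range _ _ _ _ (by omega)]
        have hd2 : PySem.List.pyGetD dist ((k : Int) + 1) 0 = T a b (k + 1) j := by
          rw [show (k : Int) + 1 = ((k + 1 : Nat) : Int) from by omega]
          rw [hdist, PySem.List.pyGetD_natCast, PySem.List.getD_map_range _ _ _ _ (by omega)]
        have hd3 : PySem.List.pyGetD ((List.range (k + 1)).map (fun i => T a b i (j + 1))) (-1) 0
            = T a b k (j + 1) := by
          rw [List.range_succ, List.map_append]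
          exact PySem.List.pyGetD_neg_one_append_singleton _ _ _
        have hT : T a b (k + 1) (j + 1) =
            if a.getD k "" == b.getD j "" then T a b k j
            else 1 + min (min (T a b k j) (T a b k (j + 1))) (T a b (k + 1) j) := by
          simp only [T]
        rw [List.range_succ (n := k + 1), List.map_append]
        rw [hd1, hd2, hd3]
        by_cases hcond : x == c2
        · rw [if_pos hcond]
          congr 1
          simp only [List.map_cons, List.map_nil]
          congr 1
          rw [hT, if_pos (by rw [hgetD, ← hc2]; exact hcond)]
        · rw [if_neg hcond]
          congr 1
          simp only [List.map_cons, List.map_nil]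
          congr 1
          rw [hT, if_neg (by rw [hgetD, ← hc2]; exact hcond)]
          rw [min_assoc, min_comm (T a b (k + 1) j) (T a b k (j + 1)), ← min_assoc]
      simp only [hstep]
      rw [show (k : Int) + 1 = ((k + 1 : Nat) : Int) from by omega]
      exact ih (k + 1) hdrop' (by omega)

lemma row_outer (a b : List String) :
    ∀ (suf : List String) (j : Nat), b.drop j = suf → j ≤ b.length →
    (PySem.List.enumerate suf (j : Int)).foldl
      (fun distances ic =>
        (PySem.List.enumerate a 0).foldl (fun ds jc =>
          if jc.2 == ic.2 then
            ds ++ [PySem.List.pyGetD distances jc.1 0]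
          else
            ds ++ [1 + min (min (PySem.List.pyGetD distances jc.1 0)
                                (PySem.List.pyGetD distances (jc.1 + 1) 0))
                           (PySem.List.pyGetD ds (-1) 0)])
          [ic.1 + 1])
      ((List.range (a.length + 1)).map (fun i => T a b i j))
    = (List.range (a.length + 1)).map (fun i => T a b i b.length) := by
  intro suf
  induction suf with
  | nil =>
      intro j hdrop hj
      have : b.length = j := by
        have := congrArg List.length hdrop
        simp [List.length_drop] at this
        omega
      simp [PySem.List.enumerate, this]
  | cons x suf' ih =>
      intro j hdrop hj
      have hjlt : j < b.length := by
        have := congrArg List.length hdrop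
        simp [List.length_drop] at this
        omega
      have hx : b[j]? = some x := by
        have h0 : (b.drop j)[0]? = b[j]? := by simp [List.getElem?_drop]
        rw [hdrop] at h0
        simpa using h0.symm
      have hgetD : b.getD j "" = x := by simp [List.getD, hx]
      have hdrop' : b.drop (j + 1) = suf' := by
        have : List.drop 1 (b.drop j) = suf' := by rw [hdrop]; simp
        rwa [List.drop_drop] at this
      rw [PySem.List.enumerate_cons, List.foldl_cons]
      have hinit : [((j : Int)) + 1] = (List.range (0 + 1)).map (fun i => T a b i (j + 1)) := by
        simp [T]
      have hrow := row_inner a b j x hgetD.symm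
        ((List.range (a.length + 1)).map (fun i => T a b i j)) rfl a 0 (by simp) (by omega)
      simp only [Int.natCast_zero] at hrow
      simp only [hinit, hrow]
      rw [show (j : Int) + 1 = ((j + 1 : Nat) : Int) from by omega]
      exact ih (j + 1) hdrop' (by omega)

lemma levA_eq_T (s1 s2 : String) :
    levenshteinDistanceA s1 s2 =
      T (PySem.Str.split₀ s1) (PySem.Str.split₀ s2)
        (PySem.Str.split₀ s1).length (PySem.Str.split₀ s2).length := by
  have main : ∀ (a b : List String),
      PySem.List.pyGetD
        ((PySem.List.enumerate b 0).foldl (fun distances ic =>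
          (PySem.List.enumerate a 0).foldl (fun ds jc =>
            if jc.2 == ic.2 then
              ds ++ [PySem.List.pyGetD distances jc.1 0]
            else
              ds ++ [1 + min (min (PySem.List.pyGetD distances jc.1 0)
                                  (PySem.List.pyGetD distances (jc.1 + 1) 0))
                             (PySem.List.pyGetD ds (-1) 0)])
            [ic.1 + 1]) (PySem.List.pyRange 0 ((a.length : Int) + 1) 1))
        (-1) 0 = T a b a.length b.length := by
    intro a b
    have hinit : PySem.List.pyRange 0 ((a.length : Int) + 1) 1
        = (List.range (a.length + 1)).map (fun i => T a b i 0) := by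
      rw [PySem.List.pyRange_one]
      rw [show ((a.length : Int) + 1 - 0).toNat = a.length + 1 from by omega]
      apply List.map_congr_left
      intro i _
      rw [T_zero_right]
      simp
    have hrow := row_outer a b b 0 (by simp) (by omega)
    simp only [Int.natCast_zero] at hrow
    rw [hinit, hrow]
    rw [List.range_succ, List.map_append]
    simp only [List.map_cons, List.map_nil]
    rw [PySem.List.pyGetD_neg_one_append_singleton]
  simp only [levenshteinDistanceA]
  by_cases hsw : (PySem.Str.split₀ s1).length > (PySem.Str.split₀ s2).length
  · rw [if_pos hsw]
    simp only
    rw [main]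
    exact (T_symm _ _ _ _).symm
  · rw [if_neg hsw]
    simp only
    rw [main]

-- ----- drivers -----

lemma final_eq (raw : String) (ps : List String) : filter_answer raw ps = filter_answer_alt raw ps := by
  have hlev : ∀ sen, levenshteinDistanceA raw sen
      = wordDistance (PySem.Str.split₀ raw) (PySem.Str.split₀ sen) := by
    intro sen
    rw [levA_eq_T, wordDistance_eq_T]
  simp only [filter_answer, filter_answer_alt, hlev]
  rw [PySem.List.foldl_append_if
        (p := fun sen => pyGe002 (wordDistance (PySem.Str.split₀ raw) (PySem.Str.split₀ sen)) (PySem.Str.len raw))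
        (f := fun sen => (wordDistance (PySem.Str.split₀ raw) (PySem.Str.split₀ sen), sen))]
  rw [List.filter_map]
  rfl

-- ===== VERDICT (by name: the statement is the Claim_ definition above) =====
theorem filter_answer_spec : Claim_equal_filter_answer := by
  intro raw ps _ _
  exact final_eq raw ps
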